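-- pv_equiv track=rewrite | github.com/Yafouuu/Python | INIT_PROG/TP/TP9/petites_betes.py | dico_par_famille
-- ===== SOURCE A (Python) =====
-- def dico_par_famille(pokedex):
--     """Construit un dictionnaire dont les les clés sont le nom de familles (str)
--     et la valeur associée est l'ensemble (set) des noms des pokemons de cette
--     famille dans le pokedex
--
--     Args:
--         pokedex (list): liste de pokemon, chaque pokemon est modélisé par
--         un couple de str (nom, famille)
--
--     Returns:
--         dict: un dictionnaire dont les clés sont le nom de familles (str) et la valeur associée est
--         l'ensemble (set) des noms des pokemons de cette famille dans le pokedex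
--
--     Invariant :
--         dico_nom contient les familles et l'ensemble des représentants de ces familles parmi les pokemons déjà traités
--
--     Complexité :
--         O(n)
--     """
--     dico_noms = dict()
--     for (nom_poke,type_poke) in pokedex :
--         if type_poke in dico_noms:
--             dico_noms[type_poke].add(nom_poke)
--         else:
--             dico_noms[type_poke] = set()
--             dico_noms[type_poke].add(nom_poke)
--     return dico_noms
-- ===== SOURCE B (Python) =====
-- def dico_par_famille(pokedex):
--     familles = list(dict.fromkeys(fam for _, fam in pokedex))
--     return {f: {nom for nom, fam in pokedex if fam == f} for f in familles}
-- ===== Notes on version B (the rewrite author's own statement) =====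
-- stated objective: alternative
-- what changed: Replaces the incremental single-pass dict-of-sets accumulation with a two-phase grouping: extract the family keys in first-occurrence order via dict.fromkeys, then build each family's name set by a comprehension filtering the pokedex per family.
import Mathlib
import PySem

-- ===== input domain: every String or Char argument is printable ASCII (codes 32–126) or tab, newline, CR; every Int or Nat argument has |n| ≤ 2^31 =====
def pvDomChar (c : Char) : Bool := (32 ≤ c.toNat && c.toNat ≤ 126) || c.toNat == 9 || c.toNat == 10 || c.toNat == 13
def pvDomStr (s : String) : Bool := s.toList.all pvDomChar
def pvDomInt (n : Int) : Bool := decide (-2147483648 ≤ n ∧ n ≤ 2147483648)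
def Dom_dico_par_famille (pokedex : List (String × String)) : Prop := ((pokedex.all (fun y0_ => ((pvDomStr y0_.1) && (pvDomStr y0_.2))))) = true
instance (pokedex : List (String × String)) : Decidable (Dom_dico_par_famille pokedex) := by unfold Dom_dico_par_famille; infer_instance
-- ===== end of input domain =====

-- B replaces A's single-pass dict-of-sets accumulation by a two-phase grouping
-- (distinct family keys first, then one filtering pass per family); alternative
-- decomposition, not claimed faster.

-- ===== PORT A =====
-- literal port of A: one fold over the pokedex maintaining a dict from family to set of names
def dico_par_famille (pokedex : List (String × String)) : List (String × List String) :=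
  (pokedex.foldl
    (fun (d : PySem.Dict String (PySem.Set String)) (p : String × String) =>
      match d.get? p.2 with
      | some s => d.insert p.2 (PySem.Set.add s p.1)              -- dico_noms[type].add(nom)
      | none   => d.insert p.2 (PySem.Set.add PySem.Set.empty p.1) -- dico_noms[type] = set(); .add(nom)
    ) PySem.Dict.empty).items

-- ===== PORT B =====
-- literal port of B: family keys in first-occurrence order (dict.fromkeys), then per-family set comprehension
def dico_par_famille_alt (pokedex : List (String × String)) : List (String × List String) :=
  (PySem.List.dedup (pokedex.map (fun p => p.2))).map
    (fun f => (f, PySem.Set.ofList ((pokedex.filter (fun p => p.2 == f)).map (fun p => p.1))))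

-- ===== PRECONDITION & SPEC =====
def Spec_dico_par_famille (pokedex : List (String × String)) (out : List (String × List String)) : Prop := out = dico_par_famille_alt pokedex
instance (pokedex : List (String × String)) (out : List (String × List String)) : Decidable (Spec_dico_par_famille pokedex out) := by unfold Spec_dico_par_famille; infer_instance

-- ===== CLAIM (what is proved, stated in full; the proofs are below) =====
def Claim_equal_dico_par_famille : Prop := ∀ (pokedex : List (String × String)), Dom_dico_par_famille pokedex → Spec_dico_par_famille pokedex (dico_par_famille pokedex)

-- ===== LEMMAS AND PROOFS =====

-- A's loop step, rewritten via getD (both branches are an insert of Set.add)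
theorem pv_step_eq (d : PySem.Dict String (PySem.Set String)) (p : String × String) :
    (match d.get? p.2 with
      | some s => d.insert p.2 (PySem.Set.add s p.1)
      | none   => d.insert p.2 (PySem.Set.add PySem.Set.empty p.1)) =
    d.insert p.2 (PySem.Set.add (d.getD p.2 PySem.Set.empty) p.1) := by
  cases h : d.get? p.2 with
  | none => simp [PySem.Dict.getD_of_get?_eq_none (h := h)]
  | some s => simp [PySem.Dict.getD_of_get?_eq_some (h := h)]

-- the grouping B computes, as a function of the processed prefix
def pvG (l : List (String × String)) : List (String × List String) :=
  (PySem.List.dedup (l.map (fun p => p.2))).map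
    (fun f => (f, PySem.Set.ofList ((l.filter (fun p => p.2 == f)).map (fun p => p.1))))

-- helper: the first component map of pvG l is the dedup'd family list
theorem pvG_map_fst (l : List (String × String)) :
    (pvG l).map (fun q => q.1) = PySem.List.dedup (l.map (fun p => p.2)) := by
  simp [pvG, List.map_map, Function.comp_def]

theorem pv_invariant (l : List (String × String)) :
    (l.foldl
      (fun (d : PySem.Dict String (PySem.Set String)) (p : String × String) =>
        d.insert p.2 (PySem.Set.add (d.getD p.2 PySem.Set.empty) p.1))
      PySem.Dict.empty).items = pvG l := by
  induction l using List.reverseRecOn with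
  | nil => rfl
  | append_singleton l' p ih =>
    rw [List.foldl_append]
    set d := (l'.foldl
      (fun (d : PySem.Dict String (PySem.Set String)) (p : String × String) =>
        d.insert p.2 (PySem.Set.add (d.getD p.2 PySem.Set.empty) p.1))
      PySem.Dict.empty) with hd
    have hkeys : d.keys = PySem.List.dedup (l'.map (fun p => p.2)) := by
      simp only [PySem.Dict.keys, ih, pvG_map_fst]
    have hnd : d.keys.Nodup := by
      rw [hkeys]; simp [PySem.Set.nodup_ofList]
    simp only [List.foldl_cons, List.foldl_nil]
    by_cases hc : p.2 ∈ l'.map (fun p => p.2)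
    · -- family already present
      have hcontains : d.contains p.2 = true := by
        rw [PySem.Dict.contains_iff_mem_keys, hkeys]
        simpa [PySem.Set.mem_ofList] using hc
      have hmemG : (p.2, PySem.Set.ofList ((l'.filter (fun q => q.2 == p.2)).map (fun q => q.1))) ∈ d.items := by
        rw [ih]
        exact List.mem_map_of_mem (by simpa [PySem.Set.mem_ofList] using hc)
      have hgetD : d.getD p.2 PySem.Set.empty
          = PySem.Set.ofList ((l'.filter (fun q => q.2 == p.2)).map (fun q => q.1)) :=
        PySem.Dict.getD_of_mem_items d hmemG hnd PySem.Set.empty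
      rw [PySem.Dict.items_insert_of_contains d _ hcontains, ih, hgetD]
      unfold pvG
      have hded : PySem.List.dedup ((l' ++ [p]).map (fun p => p.2))
          = PySem.List.dedup (l'.map (fun p => p.2)) := by
        simp only [List.map_append, List.map_cons, List.map_nil, PySem.List.dedup_eq_ofList,
          PySem.Set.ofList_append_singleton]
        exact PySem.Set.add_of_mem (by simpa [PySem.Set.mem_ofList] using hc)
      rw [hded, List.map_map]
      apply List.map_congr_left
      intro f hf
      by_cases hfp : f = p.2
      · subst hfp
        simp only [Function.comp, beq_self_eq_true, if_true]
        rw [List.filter_append, List.map_append]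
        simp only [List.filter_cons, List.filter_nil, List.map_cons, List.map_nil,
          beq_self_eq_true, if_true]
        rw [PySem.Set.ofList_append_singleton]
      · have : ¬ (p.2 == f) = true := by simp [beq_iff_eq]; exact fun h => hfp h.symm
        simp only [Function.comp, List.filter_append]
        rw [if_neg (by simp [beq_iff_eq]; exact hfp)]
        simp [this]
    · -- fresh family
      have hcontains : d.contains p.2 = false := by
        rw [← Bool.not_eq_true, PySem.Dict.contains_iff_mem_keys, hkeys]
        simpa [PySem.Set.mem_ofList] using hc
      have hgetD : d.getD p.2 PySem.Set.empty = PySem.Set.empty :=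
        PySem.Dict.getD_of_not_contains d PySem.Set.empty hcontains
      rw [PySem.Dict.items_insert_of_not_contains d _ hcontains, ih, hgetD]
      unfold pvG
      have hded : PySem.List.dedup ((l' ++ [p]).map (fun p => p.2))
          = PySem.List.dedup (l'.map (fun p => p.2)) ++ [p.2] := by
        simp only [List.map_append, List.map_cons, List.map_nil, PySem.List.dedup_eq_ofList,
          PySem.Set.ofList_append_singleton]
        exact PySem.Set.add_of_not_mem (by simpa [PySem.Set.mem_ofList] using hc)
      rw [hded, List.map_append]
      congr 1
      · apply List.map_congr_left
        intro f hf
        have hfmem : f ∈ l'.map (fun p => p.2) := by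
          rw [PySem.List.dedup_eq_ofList] at hf
          simpa [PySem.Set.mem_ofList] using hf
        have hfp : ¬ (p.2 == f) = true := by
          simp only [beq_iff_eq]; intro h; exact hc (h ▸ hfmem)
        simp [List.filter_append, hfp]
      · have hfilt : l'.filter (fun q => q.2 == p.2) = [] := by
          rw [List.filter_eq_nil_iff]
          intro a ha
          simp only [beq_iff_eq]
          intro h; exact hc (h ▸ List.mem_map_of_mem ha)
        simp [List.filter_append, hfilt, PySem.Set.empty,
          PySem.Set.ofList_eq_self_of_nodup [p.1] (List.nodup_singleton p.1)]

theorem dico_par_famille_spec : Claim_equal_dico_par_famille := by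
  intro pokedex _
  unfold Spec_dico_par_famille dico_par_famille dico_par_famille_alt
  have hstep : (fun (d : PySem.Dict String (PySem.Set String)) (p : String × String) =>
      match d.get? p.2 with
      | some s => d.insert p.2 (PySem.Set.add s p.1)
      | none   => d.insert p.2 (PySem.Set.add PySem.Set.empty p.1)) =
      (fun (d : PySem.Dict String (PySem.Set String)) (p : String × String) =>
        d.insert p.2 (PySem.Set.add (d.getD p.2 PySem.Set.empty) p.1)) := by
    funext d p; exact pv_step_eq d p
  rw [hstep]
  exact pv_invariant pokedex
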